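-- pv_equiv track=rewrite | github.com/nithinppn/Create-CV-Cover-Letter | cv_core.py | enforce_bullet_limit
-- ===== SOURCE A (Python) =====
-- def enforce_bullet_limit(text: str, max_bullets: int) -> str:
--     """Limit bullets per role/block; reset on header lines."""
--     lines = text.split("\n")
--     cleaned = []
--     count = 0
--     for line in lines:
--         line_stripped = line.strip()
--         if not line_stripped:
--             continue
--         if line_stripped.startswith("- ") or line_stripped.startswith("* "):
--             if count < max_bullets:
--                 cleaned.append(line_stripped)
--                 count += 1
--         else:
--             if cleaned:
--                 cleaned.append("")
--             cleaned.append(line_stripped)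
--             count = 0
--     return "\n".join(cleaned)
-- ===== SOURCE B (Python) =====
-- def enforce_bullet_limit(text: str, max_bullets: int) -> str:
--     """Limit bullets per role/block; reset on header lines.
--
--     Different decomposition: partition the non-empty stripped lines into
--     sections (a new section starts at each header line), trim each section's
--     bullets, then join kept sections with blank lines.
--     """
--     def is_bullet(s):
--         return s.startswith("- ") or s.startswith("* ")
--
--     lines = [s for s in (l.strip() for l in text.split("\n")) if s]
--     sections = []
--     cur = []  # leading bullet-only section (possibly empty)
--     for s in lines:
--         if is_bullet(s):
--             cur.append(s)
--         else:
--             sections.append(cur)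
--             cur = [s]
--     sections.append(cur)
--
--     limit = max(max_bullets, 0)
--     parts = []
--     for sec in sections:
--         if sec and not is_bullet(sec[0]):
--             kept = sec[:1 + limit]   # header + at most `limit` bullets
--         else:
--             kept = sec[:limit]       # leading bullet-only section
--         if kept:
--             parts.append("\n".join(kept))
--     return "\n\n".join(parts)
-- ===== Notes on version B (the rewrite author's own statement) =====
-- stated objective: alternative
-- what changed: B partitions the non-empty stripped lines into sections (a new section at each header line), trims each section to at most max_bullets bullets, and joins the kept sections with blank lines, instead of A's single pass with a running bullet counter and inline blank-line insertion.
import Mathlib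
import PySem

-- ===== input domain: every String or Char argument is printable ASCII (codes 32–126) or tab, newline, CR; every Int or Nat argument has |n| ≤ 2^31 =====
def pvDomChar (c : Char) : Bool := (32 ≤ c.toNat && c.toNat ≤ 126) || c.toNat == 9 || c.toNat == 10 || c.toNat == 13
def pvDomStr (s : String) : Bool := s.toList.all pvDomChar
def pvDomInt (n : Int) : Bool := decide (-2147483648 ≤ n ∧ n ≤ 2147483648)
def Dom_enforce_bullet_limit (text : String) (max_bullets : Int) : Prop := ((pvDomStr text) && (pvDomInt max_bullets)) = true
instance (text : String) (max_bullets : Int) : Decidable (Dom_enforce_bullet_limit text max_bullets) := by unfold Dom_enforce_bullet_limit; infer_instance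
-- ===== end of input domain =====

-- B re-decomposes the task: partition the non-empty stripped lines into sections at header
-- lines, trim each section's bullets, and join the kept sections with blank lines (alternative
-- decomposition, same cost); A does one pass with a bullet counter and inline separator insertion.

-- ===== PORT A =====
-- loop body of A (one line of the for-loop, including the strip and the empty-line skip)
def pvStepA (max_bullets : Int) (st : List String × Int) (line : String) : List String × Int :=
  let line_stripped := PySem.Str.strip line
  if line_stripped = "" then st
  else if PySem.Str.startswith line_stripped "- " || PySem.Str.startswith line_stripped "* " then
    (if st.2 < max_bullets then (st.1 ++ [line_stripped], st.2 + 1) else st)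
  else ((if st.1 = [] then st.1 else st.1 ++ [""]) ++ [line_stripped], 0)

def enforce_bullet_limit (text : String) (max_bullets : Int) : String :=
  let lines := (PySem.Str.split? text "\n").getD []   -- exact: sep "\n" ≠ "" so split? is some
  PySem.Str.join "\n" ((lines.foldl (pvStepA max_bullets) ([], 0)).1)

-- ===== PORT B =====
def pvIsBullet (s : String) : Bool :=
  PySem.Str.startswith s "- " || PySem.Str.startswith s "* "

-- partition step: bullets extend the current section, a header starts a new one
def pvStepB (st : List (List String) × List String) (s : String) : List (List String) × List String :=
  if pvIsBullet s then (st.1, st.2 ++ [s]) else (st.1 ++ [st.2], [s])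

-- sec[:1+limit] for a header section, sec[:limit] for the (leading) bullet-only section
def pvKept (limit : Int) (sec : List String) : List String :=
  match sec with
  | [] => PySem.List.slice ([] : List String) none (some limit)
  | h :: t =>
    if pvIsBullet h then PySem.List.slice (h :: t) none (some limit)
    else PySem.List.slice (h :: t) none (some (1 + limit))

def enforce_bullet_limit_alt (text : String) (max_bullets : Int) : String :=
  let lines := ((((PySem.Str.split? text "\n").getD []).map PySem.Str.strip).filter (fun s => s ≠ ""))
  let st := lines.foldl pvStepB ([], [])
  let sections := st.1 ++ [st.2]
  let limit : Int := max max_bullets 0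
  let parts := sections.foldl (fun parts sec =>
      let kept := pvKept limit sec
      if kept = [] then parts else parts ++ [PySem.Str.join "\n" kept]) ([] : List String)
  PySem.Str.join "\n\n" parts

-- ===== PRECONDITION & SPEC =====
def Spec_enforce_bullet_limit (text : String) (max_bullets : Int) (out : String) : Prop := out = enforce_bullet_limit_alt text max_bullets
instance (text : String) (max_bullets : Int) (out : String) : Decidable (Spec_enforce_bullet_limit text max_bullets out) := by unfold Spec_enforce_bullet_limit; infer_instance

-- ===== CLAIM (what is proved, stated in full; the proofs are below) =====
def Claim_equal_enforce_bullet_limit : Prop := ∀ (text : String) (max_bullets : Int), Dom_enforce_bullet_limit text max_bullets → Spec_enforce_bullet_limit text max_bullets (enforce_bullet_limit text max_bullets)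

-- ===== LEMMAS AND PROOFS =====

-- A's loop body on an already stripped, non-empty line
def pvCoreA (max_bullets : Int) (st : List String × Int) (ls : String) : List String × Int :=
  if pvIsBullet ls then
    (if st.2 < max_bullets then (st.1 ++ [ls], st.2 + 1) else st)
  else ((if st.1 = [] then st.1 else st.1 ++ [""]) ++ [ls], 0)

-- number of bullet lines held by a section (everything except a leading header)
def pvBslots : List String → Nat
  | [] => 0
  | h :: t => if pvIsBullet h then t.length + 1 else t.length

-- the lines kept from one section when at most k bullets survive
def pvKeptN (k : Nat) : List String → List String
  | [] => []
  | h :: t => if pvIsBullet h then (h :: t).take k else (h :: t).take (1 + k)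

-- kept, non-empty sections
def pvSecs (k : Nat) (K : List (List String)) : List (List String) :=
  (K.map (pvKeptN k)).filter (fun x => x ≠ [])

-- flatten sections into lines with an empty line between consecutive sections
def pvSepFlat : List (List String) → List String
  | [] => []
  | x :: xs => x ++ xs.flatMap (fun y => "" :: y)

theorem pvStepA_eq_core (mb : Int) (st : List String × Int) (l : String)
    (h : PySem.Str.strip l ≠ "") : pvStepA mb st l = pvCoreA mb st (PySem.Str.strip l) := by
  simp [pvStepA, pvCoreA, pvIsBullet, h]

theorem pvFoldA_eq (mb : Int) : ∀ (lines : List String) (st : List String × Int),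
    lines.foldl (pvStepA mb) st
      = ((lines.map PySem.Str.strip).filter (fun s => s ≠ "")).foldl (pvCoreA mb) st := by
  intro lines
  induction lines with
  | nil => intro st; rfl
  | cons l rest ih =>
    intro st
    by_cases h : PySem.Str.strip l = ""
    · simp [List.foldl_cons, pvStepA, h, ih]
    · simp [List.foldl_cons, pvStepA_eq_core mb st l h, h, ih]

theorem pvSepFlat_snoc (K : List (List String)) (x : List String) :
    pvSepFlat (K ++ [x]) = pvSepFlat K ++ (if K = [] then x else "" :: x) := by
  cases K with
  | nil => simp [pvSepFlat]
  | cons a as => simp [pvSepFlat, List.flatMap_append]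

theorem pvSepFlat_eq_nil (K : List (List String)) (h : ∀ x ∈ K, x ≠ []) :
    pvSepFlat K = [] ↔ K = [] := by
  cases K with
  | nil => simp [pvSepFlat]
  | cons a as =>
    have ha : a ≠ [] := h a (by simp)
    simp [pvSepFlat, List.append_eq_nil_iff, ha]

theorem pvSecs_mem_ne (k : Nat) (K : List (List String)) :
    ∀ x ∈ pvSecs k K, x ≠ [] := by
  intro x hx
  have := (List.mem_filter.mp hx).2
  simpa using this

theorem pvSecs_snoc_nil (k : Nat) (K : List (List String)) (c : List String)
    (h : pvKeptN k c = []) : pvSecs k (K ++ [c]) = pvSecs k K := by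
  simp [pvSecs, List.filter_append, h]

theorem pvSecs_snoc_ne (k : Nat) (K : List (List String)) (c : List String)
    (h : pvKeptN k c ≠ []) : pvSecs k (K ++ [c]) = pvSecs k K ++ [pvKeptN k c] := by
  simp [pvSecs, List.filter_append, h]

theorem pvBslots_snoc_bullet (cur : List String) (s : String) (hs : pvIsBullet s = true) :
    pvBslots (cur ++ [s]) = pvBslots cur + 1 := by
  cases cur with
  | nil => simp [pvBslots, hs]
  | cons h t => by_cases hh : pvIsBullet h = true <;> simp [pvBslots, hh]

theorem pvTakeSnocLt {α : Type} (l : List α) (x : α) (n : Nat) (h : l.length < n) :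
    (l ++ [x]).take n = l ++ [x] :=
  List.take_of_length_le (by simp; omega)

theorem pvKeptN_snoc_lt (k : Nat) (cur : List String) (s : String)
    (hlt : pvBslots cur < k) :
    pvKeptN k (cur ++ [s]) = pvKeptN k cur ++ [s] := by
  cases cur with
  | nil =>
    simp [pvBslots] at hlt
    by_cases hb : pvIsBullet s = true <;>
      simp [pvKeptN, hb,
            List.take_of_length_le (by simp only [List.length_cons, List.length_nil]; omega : [s].length ≤ k),
            List.take_of_length_le (by simp only [List.length_cons, List.length_nil]; omega : [s].length ≤ 1 + k)]
  | cons h t =>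
    by_cases hh : pvIsBullet h = true
    · have hlen : (h :: t).length < k := by simp [pvBslots, hh] at hlt; simp; omega
      simp only [List.cons_append, pvKeptN, hh, if_pos]
      rw [← List.cons_append, pvTakeSnocLt _ _ _ hlen,
          List.take_of_length_le (le_of_lt hlen)]
    · have hlen : (h :: t).length < 1 + k := by simp [pvBslots, hh] at hlt; simp; omega
      simp only [List.cons_append, pvKeptN, hh, if_neg, Bool.false_eq_true, not_false_eq_true]
      rw [← List.cons_append, pvTakeSnocLt _ _ _ hlen,
          List.take_of_length_le (le_of_lt hlen)]

theorem pvKeptN_snoc_ge (k : Nat) (cur : List String) (s : String)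
    (hs : pvIsBullet s = true) (hge : k ≤ pvBslots cur) :
    pvKeptN k (cur ++ [s]) = pvKeptN k cur := by
  cases cur with
  | nil =>
    have hk0 : k = 0 := by simp [pvBslots] at hge; omega
    subst hk0
    simp [pvKeptN, hs]
  | cons h t =>
    by_cases hh : pvIsBullet h = true
    · have hlen : k ≤ (h :: t).length := by simp [pvBslots, hh] at hge; simp; omega
      simp only [List.cons_append, pvKeptN, hh, if_pos]
      rw [← List.cons_append, List.take_append_of_le_length hlen]
    · have hlen : 1 + k ≤ (h :: t).length := by simp [pvBslots, hh] at hge; simp; omega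
      simp only [List.cons_append, pvKeptN, hh, if_neg, Bool.false_eq_true, not_false_eq_true]
      rw [← List.cons_append, List.take_append_of_le_length hlen]

theorem pvKeptN_ne_header (k : Nat) (h : String) (t : List String)
    (hh : ¬ pvIsBullet h = true) : pvKeptN k (h :: t) ≠ [] := by
  intro hC
  have := congrArg List.length hC
  simp [pvKeptN, hh, List.length_take] at this

theorem pvKeptN_ne_of_lt (k : Nat) (cur : List String) (hne : cur ≠ [])
    (hlt : pvBslots cur < k) : pvKeptN k cur ≠ [] := by
  cases cur with
  | nil => exact absurd rfl hne
  | cons h t =>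
    by_cases hh : pvIsBullet h = true
    · simp [pvBslots, hh] at hlt
      intro hC
      have := congrArg List.length hC
      simp [pvKeptN, hh, List.length_take] at this
      omega
    · exact pvKeptN_ne_header k h t hh

-- main loop invariant: A's (cleaned, count) tracks B's (sections, current section)
theorem pvMain (mb : Int) (k : Nat) (hk : k = mb.toNat) :
    ∀ (ls : List String), (∀ s ∈ ls, s ≠ "") →
    ∀ (secs : List (List String)) (cur cleaned : List String) (count : Int),
      (cur = [] → secs = []) →
      cleaned = pvSepFlat (pvSecs k (secs ++ [cur])) →
      count = ((min (pvBslots cur) k : Nat) : Int) →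
      ((ls.foldl pvStepB (secs, cur)).2 = [] → (ls.foldl pvStepB (secs, cur)).1 = []) ∧
      (ls.foldl (pvCoreA mb) (cleaned, count)).1
        = pvSepFlat (pvSecs k ((ls.foldl pvStepB (secs, cur)).1 ++ [(ls.foldl pvStepB (secs, cur)).2])) ∧
      (ls.foldl (pvCoreA mb) (cleaned, count)).2
        = ((min (pvBslots (ls.foldl pvStepB (secs, cur)).2) k : Nat) : Int) := by
  intro ls
  induction ls with
  | nil =>
    intro _ secs cur cleaned count h3 h1 h2
    exact ⟨h3, h1, h2⟩
  | cons s rest ih =>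
    intro hne secs cur cleaned count h3 h1 h2
    have hsne : s ≠ "" := hne s (by simp)
    have hrest : ∀ x ∈ rest, x ≠ "" := fun x hx => hne x (by simp [hx])
    by_cases hb : pvIsBullet s = true
    · -- bullet line
      by_cases hlt : pvBslots cur < k
      · -- bullet is kept
        have hcount : count < mb := by omega
        have hstepB : pvStepB (secs, cur) s = (secs, cur ++ [s]) := by simp [pvStepB, hb]
        have hstepA : pvCoreA mb (cleaned, count) s = (cleaned ++ [s], count + 1) := by
          simp [pvCoreA, hb, hcount]
        have hkept : pvKeptN k (cur ++ [s]) = pvKeptN k cur ++ [s] := pvKeptN_snoc_lt k cur s hlt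
        have hclean' : cleaned ++ [s] = pvSepFlat (pvSecs k (secs ++ [cur ++ [s]])) := by
          rw [pvSecs_snoc_ne k secs _ (by rw [hkept]; simp), hkept]
          by_cases hcur : cur = []
          · subst hcur
            have hsecs : secs = [] := h3 rfl
            subst hsecs
            have hcl : cleaned = [] := by rw [h1]; simp [pvSecs, pvKeptN, pvSepFlat]
            simp [hcl, pvKeptN, pvSecs, pvSepFlat]
          · have hkne : pvKeptN k cur ≠ [] := pvKeptN_ne_of_lt k cur hcur hlt
            have h1' : cleaned = pvSepFlat (pvSecs k secs ++ [pvKeptN k cur]) := by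
              rw [h1, pvSecs_snoc_ne k secs cur hkne]
            rw [h1', pvSepFlat_snoc, pvSepFlat_snoc]
            by_cases hS : pvSecs k secs = [] <;> simp [hS]
        have hcount' : count + 1 = ((min (pvBslots (cur ++ [s])) k : Nat) : Int) := by
          rw [pvBslots_snoc_bullet cur s hb]; omega
        have := ih hrest secs (cur ++ [s]) (cleaned ++ [s]) (count + 1)
          (by simp) hclean' hcount'
        simpa [List.foldl_cons, hstepB, hstepA] using this
      · -- bullet is dropped
        have hcount : ¬ count < mb := by omega
        have hstepB : pvStepB (secs, cur) s = (secs, cur ++ [s]) := by simp [pvStepB, hb]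
        have hstepA : pvCoreA mb (cleaned, count) s = (cleaned, count) := by
          simp [pvCoreA, hb, hcount]
        have hkept : pvKeptN k (cur ++ [s]) = pvKeptN k cur := pvKeptN_snoc_ge k cur s hb (by omega)
        have hclean' : cleaned = pvSepFlat (pvSecs k (secs ++ [cur ++ [s]])) := by
          by_cases hke : pvKeptN k cur = []
          · rw [pvSecs_snoc_nil k secs _ (by rw [hkept]; exact hke), h1, pvSecs_snoc_nil k secs cur hke]
          · rw [pvSecs_snoc_ne k secs _ (by rw [hkept]; exact hke), hkept, h1, pvSecs_snoc_ne k secs cur hke]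
        have hcount' : count = ((min (pvBslots (cur ++ [s])) k : Nat) : Int) := by
          rw [pvBslots_snoc_bullet cur s hb]; omega
        have := ih hrest secs (cur ++ [s]) cleaned count (by simp) hclean' hcount'
        simpa [List.foldl_cons, hstepB, hstepA] using this
    · -- header line
      have hstepB : pvStepB (secs, cur) s = (secs ++ [cur], [s]) := by simp [pvStepB, hb]
      have hstepA : pvCoreA mb (cleaned, count) s
          = ((if cleaned = [] then cleaned else cleaned ++ [""]) ++ [s], 0) := by
        simp [pvCoreA, hb]
      have hkeptS : pvKeptN k [s] = [s] := by simp [pvKeptN, hb]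
      have hclean' : (if cleaned = [] then cleaned else cleaned ++ [""]) ++ [s]
          = pvSepFlat (pvSecs k ((secs ++ [cur]) ++ [[s]])) := by
        rw [pvSecs_snoc_ne k _ _ (by rw [hkeptS]; simp), hkeptS]
        have hX : cleaned = [] ↔ pvSecs k (secs ++ [cur]) = [] := by
          rw [h1]; exact pvSepFlat_eq_nil _ (pvSecs_mem_ne k _)
        rw [pvSepFlat_snoc, ← h1]
        by_cases hc : cleaned = []
        · simp [hc, hX.mp hc]
        · have hXne : ¬ pvSecs k (secs ++ [cur]) = [] := fun h => hc (hX.mpr h)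
          simp [hc, hXne]
      have hcount' : (0 : Int) = ((min (pvBslots [s]) k : Nat) : Int) := by
        simp [pvBslots, hb]
      have := ih hrest (secs ++ [cur]) [s] _ 0 (by simp) hclean' hcount'
      simpa [List.foldl_cons, hstepB, hstepA] using this

theorem pvKept_eq (mb : Int) (sec : List String) :
    pvKept (max mb 0) sec = pvKeptN mb.toNat sec := by
  have h0 : (0:Int) ≤ max mb 0 := le_max_right _ _
  have h1 : (0:Int) ≤ 1 + max mb 0 := by omega
  have ht : (max mb 0).toNat = mb.toNat := by omega
  have ht1 : (1 + max mb 0).toNat = 1 + mb.toNat := by omega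
  cases sec with
  | nil => simp [pvKept, pvKeptN, PySem.List.slice_to _ h0]
  | cons h t =>
    by_cases hh : pvIsBullet h = true
    · simp [pvKept, pvKeptN, hh, PySem.List.slice_to _ h0, ht]
    · simp [pvKept, pvKeptN, hh, PySem.List.slice_to _ h1, ht1]

theorem pvFoldParts (F : List String → List String) :
    ∀ (l : List (List String)) (acc : List String),
      l.foldl (fun parts sec =>
        let kept := F sec
        if kept = [] then parts else parts ++ [PySem.Str.join "\n" kept]) acc
      = acc ++ ((l.map F).filter (fun x => x ≠ [])).map (PySem.Str.join "\n") := by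
  intro l
  induction l with
  | nil => intro acc; simp
  | cons a as ih =>
    intro acc
    by_cases h : F a = [] <;> simp [List.foldl_cons, h, ih]

theorem pvCharsJoinAppend (sep : List Char) :
    ∀ (a b : List (List Char)), a ≠ [] → b ≠ [] →
      PySem.Chars.join sep (a ++ b)
        = PySem.Chars.join sep a ++ sep ++ PySem.Chars.join sep b := by
  intro a
  induction a with
  | nil => intro b h; exact absurd rfl h
  | cons a0 as ih =>
    intro b _ hb
    cases as with
    | nil =>
      cases b with
      | nil => exact absurd rfl hb
      | cons b0 bs =>
        simp [PySem.Chars.join_cons_cons, PySem.Chars.join_singleton]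
    | cons a1 as' =>
      have e1 : a0 :: a1 :: as' ++ b = a0 :: a1 :: (as' ++ b) := by simp
      rw [e1, PySem.Chars.join_cons_cons]
      have e2 : a1 :: (as' ++ b) = (a1 :: as') ++ b := by simp
      rw [e2, ih b (by simp) hb, PySem.Chars.join_cons_cons]
      simp [List.append_assoc]

def pvSepFlatC : List (List (List Char)) → List (List Char)
  | [] => []
  | x :: xs => x ++ xs.flatMap (fun y => ([] : List Char) :: y)

theorem pvSepFlatC_map (K : List (List String)) :
    (pvSepFlat K).map String.toList = pvSepFlatC (K.map (List.map String.toList)) := by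
  cases K with
  | nil => rfl
  | cons x xs =>
    simp [pvSepFlat, pvSepFlatC, List.map_flatMap, List.flatMap_map]

theorem pvCharsSep : ∀ (K : List (List (List Char))), (∀ x ∈ K, x ≠ []) →
    PySem.Chars.join ['\n'] (pvSepFlatC K)
      = PySem.Chars.join ['\n', '\n'] (K.map (PySem.Chars.join ['\n'])) := by
  intro K
  induction K with
  | nil => intro _; rfl
  | cons x xs ih =>
    intro h
    have hx : x ≠ [] := h x (by simp)
    cases xs with
    | nil => simp [pvSepFlatC, PySem.Chars.join_singleton]
    | cons y ys =>
      have hy : y ≠ [] := h y (by simp)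
      have hxs : ∀ z ∈ (y :: ys), z ≠ [] := fun z hz => h z (by simp [hz])
      have hrest : pvSepFlatC (y :: ys) ≠ [] := by
        simp [pvSepFlatC, List.append_eq_nil_iff, hy]
      obtain ⟨r0, rs, hr⟩ := List.exists_cons_of_ne_nil hrest
      have e1 : pvSepFlatC (x :: y :: ys) = x ++ ([] : List Char) :: pvSepFlatC (y :: ys) := by
        simp [pvSepFlatC]
      rw [e1, pvCharsJoinAppend ['\n'] x _ hx (by simp), hr,
          PySem.Chars.join_cons_cons, ← hr, ih hxs]
      simp only [List.map_cons]
      rw [PySem.Chars.join_cons_cons]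
      simp [List.append_assoc]

theorem pvJoinSepFlat (K : List (List String)) (h : ∀ x ∈ K, x ≠ []) :
    PySem.Str.join "\n" (pvSepFlat K)
      = PySem.Str.join "\n\n" (K.map (PySem.Str.join "\n")) := by
  have hnl : ("\n" : String).toList = ['\n'] := by decide
  have hnl2 : ("\n\n" : String).toList = ['\n', '\n'] := by decide
  rw [← String.toList_inj, PySem.Str.toList_join, PySem.Str.toList_join, hnl, hnl2]
  rw [pvSepFlatC_map, pvCharsSep _ (by
    intro z hz
    simp only [List.mem_map] at hz
    obtain ⟨w, hw, hwz⟩ := hz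
    have := h w hw
    simp [← hwz, this])]
  congr 1
  simp [List.map_map, Function.comp, PySem.Str.toList_join, hnl]

-- ===== VERDICT (by name: the statement is the Claim_ definition above) =====
theorem enforce_bullet_limit_spec : Claim_equal_enforce_bullet_limit := by
  intro text mb _
  unfold Spec_enforce_bullet_limit enforce_bullet_limit enforce_bullet_limit_alt
  simp only []
  set lines := (PySem.Str.split? text "\n").getD [] with hlines
  set L := (lines.map PySem.Str.strip).filter (fun s => s ≠ "") with hL
  have hLne : ∀ s ∈ L, s ≠ "" := by
    intro s hs
    have := (List.mem_filter.mp hs).2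
    simpa using this
  set k := mb.toNat with hk
  have hmain := pvMain mb k rfl L hLne [] [] [] 0 (fun _ => rfl)
    (by simp [pvSecs, pvKeptN, pvSepFlat]) (by simp [pvBslots])
  rw [pvFoldA_eq, ← hL, hmain.2.1]
  have hkept : pvKept (max mb 0) = pvKeptN k := funext (pvKept_eq mb)
  rw [pvFoldParts]
  rw [hkept]
  rw [pvJoinSepFlat _ (pvSecs_mem_ne k _)]
  rfl
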